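-- pv_equiv track=rewrite | github.com/Pardus-LiderAhenk/ahenk | src/plugins/script/policy.py | format_contents
-- ===== SOURCE A (Python) =====
-- def format_contents(contents):
--     tmp = contents
--     replacements = list()
--     replacements.append(('&dbq;', '\"'))
--     replacements.append(('&sgq;', '\''))
--     for r, n in replacements:
--         tmp = tmp.replace(r, n)
--     return tmp
-- ===== SOURCE B (Python) =====
-- def format_contents(contents):
--     mapping = {'&dbq;': '"', '&sgq;': "'"}
--     out = []
--     i = 0
--     n = len(contents)
--     while i < n:
--         tok = contents[i:i+5]
--         if tok in mapping:
--             out.append(mapping[tok])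
--             i += 5
--         else:
--             out.append(contents[i])
--             i += 1
--     return ''.join(out)
-- ===== Notes on version B (the rewrite author's own statement) =====
-- stated objective: alternative
-- what changed: Two sequential str.replace passes are replaced by one left-to-right scan that dispatches each 5-char window through a token->quote dict and joins the pieces.
import Mathlib
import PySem

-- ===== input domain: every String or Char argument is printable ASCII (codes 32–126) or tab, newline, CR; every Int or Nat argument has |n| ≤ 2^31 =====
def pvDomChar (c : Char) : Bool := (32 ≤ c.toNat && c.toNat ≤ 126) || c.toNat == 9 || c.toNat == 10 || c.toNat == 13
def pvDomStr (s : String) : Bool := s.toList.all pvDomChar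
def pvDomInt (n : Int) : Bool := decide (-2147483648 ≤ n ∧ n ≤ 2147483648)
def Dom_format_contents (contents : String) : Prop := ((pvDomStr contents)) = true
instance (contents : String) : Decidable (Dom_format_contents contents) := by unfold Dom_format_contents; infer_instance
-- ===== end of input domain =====

-- B replaces A's two sequential .replace passes by one left-to-right scan with a token→quote lookup (alternative decomposition, same cost).

-- ===== PORT A =====
def format_contents (contents : String) : String :=
  let tmp := contents
  let replacements : List (String × String) := ([] ++ [("&dbq;", "\"")]) ++ [("&sgq;", "'")]
  replacements.foldl (fun tmp rn => PySem.Str.replace tmp rn.1 rn.2) tmp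

-- ===== PORT B =====
-- hand port of B's while-loop: at each position take the 5-char window (contents[i:i+5]);
-- if it is one of the two tokens emit its quote and advance 5, else emit the char and advance 1
def fcScan : List Char → List Char
  | [] => []
  | c :: t =>
    if (c :: t).take 5 = ['&', 'd', 'b', 'q', ';'] then '"' :: fcScan (t.drop 4)
    else if (c :: t).take 5 = ['&', 's', 'g', 'q', ';'] then '\'' :: fcScan (t.drop 4)
    else c :: fcScan t
termination_by l => l.length
decreasing_by all_goals (simp; try omega)

def format_contents_alt (contents : String) : String :=
  String.ofList (fcScan contents.toList)

-- ===== PRECONDITION & SPEC =====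
def Spec_format_contents (contents : String) (out : String) : Prop := out = format_contents_alt contents
instance (contents : String) (out : String) : Decidable (Spec_format_contents contents out) := by unfold Spec_format_contents; infer_instance

-- ===== CLAIM (what is proved, stated in full; the proofs are below) =====
def Claim_equal_format_contents : Prop := ∀ (contents : String), Dom_format_contents contents → Spec_format_contents contents (format_contents contents)

-- ===== LEMMAS AND PROOFS =====

-- structural model of one .replace pass for each token
def substD : List Char → List Char
  | [] => []
  | c :: t =>
    if List.isPrefixOf ['&', 'd', 'b', 'q', ';'] (c :: t) then '"' :: substD (t.drop 4)
    else c :: substD t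
termination_by l => l.length
decreasing_by all_goals (simp; try omega)

def substS : List Char → List Char
  | [] => []
  | c :: t =>
    if List.isPrefixOf ['&', 's', 'g', 'q', ';'] (c :: t) then '\'' :: substS (t.drop 4)
    else c :: substS t
termination_by l => l.length
decreasing_by all_goals (simp; try omega)

lemma go_spec_dbq : ∀ (fuel : Nat) (l acc : List Char), l.length ≤ fuel →
    PySem.Chars.replace.go ['&', 'd', 'b', 'q', ';'] ['"'] fuel l acc = acc.reverse ++ substD l := by
  intro fuel
  induction fuel with
  | zero =>
    intro l acc h
    have hl : l = [] := List.eq_nil_of_length_eq_zero (Nat.le_zero.mp h)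
    subst hl
    simp [PySem.Chars.replace.go, substD]
  | succ n ih =>
    intro l acc h
    cases l with
    | nil => simp [PySem.Chars.replace.go, substD]
    | cons c t =>
      rw [PySem.Chars.replace.go, substD]
      by_cases hp : List.isPrefixOf ['&', 'd', 'b', 'q', ';'] (c :: t)
      · rw [if_pos hp, if_pos hp]
        rw [show List.drop (['&', 'd', 'b', 'q', ';'] : List Char).length (c :: t) = t.drop 4 from rfl]
        rw [ih (t.drop 4) _ (by simp at h ⊢; omega)]
        simp
      · rw [if_neg hp, if_neg hp]
        rw [ih t (c :: acc) (by simp at h ⊢; omega)]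
        simp

lemma go_spec_sgq : ∀ (fuel : Nat) (l acc : List Char), l.length ≤ fuel →
    PySem.Chars.replace.go ['&', 's', 'g', 'q', ';'] ['\''] fuel l acc = acc.reverse ++ substS l := by
  intro fuel
  induction fuel with
  | zero =>
    intro l acc h
    have hl : l = [] := List.eq_nil_of_length_eq_zero (Nat.le_zero.mp h)
    subst hl
    simp [PySem.Chars.replace.go, substS]
  | succ n ih =>
    intro l acc h
    cases l with
    | nil => simp [PySem.Chars.replace.go, substS]
    | cons c t =>
      rw [PySem.Chars.replace.go, substS]
      by_cases hp : List.isPrefixOf ['&', 's', 'g', 'q', ';'] (c :: t)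
      · rw [if_pos hp, if_pos hp]
        rw [show List.drop (['&', 's', 'g', 'q', ';'] : List Char).length (c :: t) = t.drop 4 from rfl]
        rw [ih (t.drop 4) _ (by simp at h ⊢; omega)]
        simp
      · rw [if_neg hp, if_neg hp]
        rw [ih t (c :: acc) (by simp at h ⊢; omega)]
        simp

lemma substD_no_dq : ∀ (n : Nat) (l p : List Char), l.length ≤ n → '"' ∉ p → p <+: substD l → p <+: l := by
  intro n
  induction n with
  | zero =>
    intro l p h _ hpre
    have hl : l = [] := List.eq_nil_of_length_eq_zero (Nat.le_zero.mp h)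
    subst hl
    simpa [substD] using hpre
  | succ n ih =>
    intro l p h hq hpre
    cases l with
    | nil => simpa [substD] using hpre
    | cons c t =>
      rw [substD] at hpre
      by_cases hp : List.isPrefixOf ['&', 'd', 'b', 'q', ';'] (c :: t)
      · rw [if_pos hp] at hpre
        cases p with
        | nil => exact List.nil_prefix
        | cons q p' =>
          rw [List.cons_prefix_cons] at hpre
          exact absurd hpre.1 (by intro hq'; exact hq (by simp [hq']))
      · rw [if_neg hp] at hpre
        cases p with
        | nil => exact List.nil_prefix
        | cons q p' =>
          rw [List.cons_prefix_cons] at hpre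
          have := ih t p' (by simp at h; omega) (fun hm => hq (List.mem_cons_of_mem _ hm)) hpre.2
          exact List.cons_prefix_cons.mpr ⟨hpre.1, this⟩

lemma main_lemma : ∀ (n : Nat) (l : List Char), l.length ≤ n → substS (substD l) = fcScan l := by
  intro n
  induction n with
  | zero =>
    intro l h
    have hl : l = [] := List.eq_nil_of_length_eq_zero (Nat.le_zero.mp h)
    subst hl
    simp [substD, substS, fcScan]
  | succ n ih =>
    intro l h
    cases l with
    | nil => simp [substD, substS, fcScan]
    | cons c t =>
      by_cases hd : List.isPrefixOf ['&', 'd', 'b', 'q', ';'] (c :: t)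
      · obtain ⟨r, hr⟩ := List.isPrefixOf_iff_prefix.mp hd
        rw [← hr]
        have hrn : r.length ≤ n := by
          have := congrArg List.length hr
          simp at this h
          omega
        simp only [List.cons_append, List.nil_append]
        rw [substD, if_pos (by simp [List.isPrefixOf])]
        rw [fcScan, if_pos (by simp)]
        rw [substS, if_neg (by simp [List.isPrefixOf])]
        simp only [List.drop_succ_cons, List.drop_zero]
        rw [ih r hrn]
      · by_cases hs : List.isPrefixOf ['&', 's', 'g', 'q', ';'] (c :: t)
        · obtain ⟨r, hr⟩ := List.isPrefixOf_iff_prefix.mp hs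
          rw [← hr]
          have hrn : r.length ≤ n := by
            have := congrArg List.length hr
            simp at this h
            omega
          simp only [List.cons_append, List.nil_append]
          rw [substD, if_neg (by simp [List.isPrefixOf])]
          rw [substD, if_neg (by simp [List.isPrefixOf])]
          rw [substD, if_neg (by simp [List.isPrefixOf])]
          rw [substD, if_neg (by simp [List.isPrefixOf])]
          rw [substD, if_neg (by simp [List.isPrefixOf])]
          rw [substS, if_pos (by simp [List.isPrefixOf])]
          rw [fcScan, if_neg (by simp), if_pos (by simp)]
          simp only [List.drop_succ_cons, List.drop_zero]
          rw [ih r hrn]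
        · have hsubD : substD (c :: t) = c :: substD t := by
            rw [substD, if_neg hd]
          have hnp : ¬ List.isPrefixOf ['&', 's', 'g', 'q', ';'] (c :: substD t) := by
            intro hcontra
            rw [← hsubD] at hcontra
            have hpref := substD_no_dq (c :: t).length (c :: t) ['&', 's', 'g', 'q', ';']
              (le_refl _) (by decide) (List.isPrefixOf_iff_prefix.mp hcontra)
            exact hs (List.isPrefixOf_iff_prefix.mpr hpref)
          have htkD : (c :: t).take 5 ≠ ['&', 'd', 'b', 'q', ';'] := by
            intro hcontra
            exact hd (List.isPrefixOf_iff_prefix.mpr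
              (List.prefix_iff_eq_take.mpr hcontra.symm))
          have htkS : (c :: t).take 5 ≠ ['&', 's', 'g', 'q', ';'] := by
            intro hcontra
            exact hs (List.isPrefixOf_iff_prefix.mpr
              (List.prefix_iff_eq_take.mpr hcontra.symm))
          rw [hsubD, substS, if_neg hnp, fcScan, if_neg htkD, if_neg htkS]
          rw [ih t (by simp at h; omega)]

-- ===== VERDICT (by name: the statement is the Claim_ definition above) =====
theorem format_contents_spec : Claim_equal_format_contents := by
  intro s _
  show format_contents s = format_contents_alt s
  have hA : format_contents s = String.ofList (PySem.Chars.replace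
      (String.ofList (PySem.Chars.replace s.toList ['&', 'd', 'b', 'q', ';'] ['"'])).toList
      ['&', 's', 'g', 'q', ';'] ['\'']) := rfl
  rw [hA]
  rw [show (String.ofList (PySem.Chars.replace s.toList ['&', 'd', 'b', 'q', ';'] ['"'])).toList
      = PySem.Chars.replace s.toList ['&', 'd', 'b', 'q', ';'] ['"'] from by simp]
  simp only [PySem.Chars.replace]
  rw [if_neg (by decide), if_neg (by decide)]
  rw [go_spec_dbq s.toList.length s.toList [] (le_refl _)]
  simp only [List.reverse_nil, List.nil_append]
  rw [go_spec_sgq (substD s.toList).length (substD s.toList) [] (le_refl _)]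
  simp only [List.reverse_nil, List.nil_append]
  unfold format_contents_alt
  rw [main_lemma s.toList.length s.toList (le_refl _)]
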